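-- pv_equiv track=rewrite | github.com/ynput/ayon-backend | ayon_server/access/utils.py | path_to_paths
-- ===== SOURCE A (Python) =====
-- def path_to_paths(
--     path: str,
--     include_parents: bool = False,
--     include_self: bool = True,
-- ) -> list[str]:
--     """Convert a path to a list of paths
--
--     If include_parents is True, the result will include all parent folders,
--     if include_self is True, the result will include the path itself.
--
--     The result is a list of strings, each string is a path WITHOUT a trailing slash,
--     in order to be used directly in an SQL query.
--
--     Bottom-level path conains a trailing wildcard, so it can be used in a LIKE query,
--     and will match all subfolders.
--     """
--     path = path.strip().strip("/")
--     pelms = path.split("/")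
--     result = [f'"{path}/%"']
--     if include_parents:
--         for i in range(len(pelms)):
--             result.append(f"\"{'/'.join(pelms[0:i+1])}\"")
--     if include_self:
--         slf = "/".join(pelms)
--         result.append(f'"{slf}"')
--     return result
-- ===== SOURCE B (Python) =====
-- def path_to_paths(
--     path: str,
--     include_parents: bool = False,
--     include_self: bool = True,
-- ) -> list[str]:
--     path = path.strip().strip("/")
--     result = ['"%s/%%"' % path]
--     if include_parents:
--         prefix = None
--         for elm in path.split("/"):
--             prefix = elm if prefix is None else prefix + "/" + elm
--             result.append('"%s"' % prefix)
--     if include_self: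
--         result.append('"%s"' % path)
--     return result
-- ===== Notes on version B (the rewrite author's own statement) =====
-- stated objective: alternative
-- what changed: The parents loop no longer re-slices and re-joins pelms[0:i+1] at every index; B makes one linear sweep over the split elements maintaining a running prefix string, and include_self reuses the already-stripped path instead of re-joining the elements.
import Mathlib
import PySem

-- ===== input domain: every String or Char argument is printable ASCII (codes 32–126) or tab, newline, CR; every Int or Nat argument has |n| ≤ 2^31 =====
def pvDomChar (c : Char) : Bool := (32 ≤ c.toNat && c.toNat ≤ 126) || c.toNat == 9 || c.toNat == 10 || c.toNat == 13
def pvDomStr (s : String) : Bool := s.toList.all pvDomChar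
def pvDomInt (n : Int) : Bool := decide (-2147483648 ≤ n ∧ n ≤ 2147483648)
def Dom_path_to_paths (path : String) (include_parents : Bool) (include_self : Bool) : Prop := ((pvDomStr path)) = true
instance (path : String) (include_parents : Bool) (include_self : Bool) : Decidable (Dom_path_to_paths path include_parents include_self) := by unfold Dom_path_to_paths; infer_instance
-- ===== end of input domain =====

-- B replaces A's quadratic per-step '/'.join(pelms[0:i+1]) (and the final rejoin for
-- include_self) by one linear sweep keeping a running prefix (alternative single-pass algorithm, same results).

-- ===== PORT A =====
def path_to_paths (path : String) (include_parents : Bool) (include_self : Bool) : List String :=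
  let p := PySem.Chars.stripChars (PySem.Chars.strip path.toList) ['/']
  let pelms := PySem.Chars.splitOn p ['/']
  let result := [String.mk ('"' :: p ++ ['/', '%', '"'])]
  let result :=
    if include_parents then
      (PySem.List.pyRange 0 (pelms.length : Int) 1).foldl
        (fun acc i =>
          acc ++ [String.mk ('"' :: PySem.Chars.join ['/'] (PySem.List.slice pelms (some 0) (some (i + 1))) ++ ['"'])])
        result
    else result
  if include_self then
    result ++ [String.mk ('"' :: PySem.Chars.join ['/'] pelms ++ ['"'])]
  else result

-- ===== PORT B =====
-- the running-prefix sweep of Source B: state = (prefix so far (none before the first element), result)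
def pttPrefixLoop : List (List Char) → Option (List Char) → List String → List String
  | [], _, res => res
  | e :: es, pref?, res =>
      let pref := match pref? with
        | none => e
        | some pf => pf ++ '/' :: e
      pttPrefixLoop es (some pref) (res ++ [String.mk ('"' :: pref ++ ['"'])])

def path_to_paths_alt (path : String) (include_parents : Bool) (include_self : Bool) : List String :=
  let p := PySem.Chars.stripChars (PySem.Chars.strip path.toList) ['/']
  let result := [String.mk ('"' :: p ++ ['/', '%', '"'])]
  let result :=
    if include_parents then pttPrefixLoop (PySem.Chars.splitOn p ['/']) none result
    else result
  if include_self then result ++ [String.mk ('"' :: p ++ ['"'])] else result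

-- ===== PRECONDITION & SPEC =====
def Spec_path_to_paths (path : String) (include_parents : Bool) (include_self : Bool) (out : List String) : Prop := out = path_to_paths_alt path include_parents include_self
instance (path : String) (include_parents : Bool) (include_self : Bool) (out : List String) : Decidable (Spec_path_to_paths path include_parents include_self out) := by unfold Spec_path_to_paths; infer_instance

-- ===== CLAIM (what is proved, stated in full; the proofs are below) =====
def Claim_equal_path_to_paths : Prop := ∀ (path : String) (include_parents : Bool) (include_self : Bool), Dom_path_to_paths path include_parents include_self → Spec_path_to_paths path include_parents include_self (path_to_paths path include_parents include_self)

-- ===== LEMMAS AND PROOFS =====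

def pvQuote (cs : List Char) : String := String.mk ('"' :: cs ++ ['"'])

-- structural description of PySem.Chars.splitOn.go for the single-char separator '/'
def pvFinish : List Char → List Char → List (List Char)
  | [], cur => [cur.reverse]
  | c :: rest, cur => if c = '/' then cur.reverse :: pvFinish rest [] else pvFinish rest (c :: cur)

theorem pvFinish_ne_nil : ∀ (l cur : List Char), pvFinish l cur ≠ [] := by
  intro l
  induction l with
  | nil => intro cur; simp [pvFinish]
  | cons c rest ih =>
      intro cur
      by_cases hc : c = '/' <;> simp [pvFinish, hc, ih]

theorem pv_go_eq : ∀ (fuel : Nat) (l cur : List Char) (acc : List (List Char)),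
    l.length ≤ fuel →
    PySem.Chars.splitOn.go ['/'] fuel l cur acc = acc.reverse ++ pvFinish l cur := by
  intro fuel
  induction fuel with
  | zero =>
      intro l cur acc hl
      have : l = [] := List.eq_nil_of_length_eq_zero (Nat.le_zero.mp hl)
      subst this
      simp [PySem.Chars.splitOn.go, pvFinish]
  | succ fuel ih =>
      intro l cur acc hl
      cases l with
      | nil => simp [PySem.Chars.splitOn.go, pvFinish]
      | cons c rest =>
          by_cases hc : c = '/'
          · subst hc
            have h1 : (['/'] : List Char).isPrefixOf ('/' :: rest) = true := by
              simp [List.isPrefixOf]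
            rw [PySem.Chars.splitOn.go]
            simp only [h1, if_pos, List.length_cons, List.length_nil, List.drop_succ_cons, List.drop_zero]
            rw [ih rest [] (cur.reverse :: acc) (by simpa using Nat.lt_succ_iff.mp (by simpa using hl))]
            simp [pvFinish]
          · have h1 : (['/'] : List Char).isPrefixOf (c :: rest) = false := by
              simp [List.isPrefixOf]
              intro h; exact hc h.symm
            rw [PySem.Chars.splitOn.go]
            simp only [h1, Bool.false_eq_true, if_false]
            rw [ih rest (c :: cur) acc (by simpa using Nat.lt_succ_iff.mp (by simpa using hl))]
            simp [pvFinish, hc]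

theorem pv_splitOn_eq (p : List Char) : PySem.Chars.splitOn p ['/'] = pvFinish p [] := by
  unfold PySem.Chars.splitOn
  rw [pv_go_eq (p.length + 1) p [] [] (Nat.le_succ _)]
  simp

theorem pv_join_pvFinish : ∀ (l cur : List Char),
    PySem.Chars.join ['/'] (pvFinish l cur) = cur.reverse ++ l := by
  intro l
  induction l with
  | nil => intro cur; simp [pvFinish, PySem.Chars.join_singleton]
  | cons c rest ih =>
      intro cur
      by_cases hc : c = '/'
      · subst hc
        obtain ⟨d, ds, hds⟩ := List.exists_cons_of_ne_nil (pvFinish_ne_nil rest [])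
        rw [show pvFinish ('/' :: rest) cur = cur.reverse :: pvFinish rest [] from by simp [pvFinish]]
        rw [hds, PySem.Chars.join_cons_cons, ← hds, ih]
        simp
      · simp only [pvFinish, if_neg hc]
        rw [ih (c :: cur)]
        simp

theorem pv_join_splitOn (p : List Char) :
    PySem.Chars.join ['/'] (PySem.Chars.splitOn p ['/']) = p := by
  rw [pv_splitOn_eq, pv_join_pvFinish]; simp

theorem pv_join_glue (a b : List Char) (l : List (List Char)) :
    PySem.Chars.join ['/'] (a :: b :: l) = PySem.Chars.join ['/'] ((a ++ '/' :: b) :: l) := by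
  cases l with
  | nil => simp [PySem.Chars.join_cons_cons, PySem.Chars.join_singleton]
  | cons x xs =>
      rw [PySem.Chars.join_cons_cons, PySem.Chars.join_cons_cons, PySem.Chars.join_cons_cons]
      simp

theorem pv_loop_some : ∀ (es : List (List Char)) (pref : List Char) (res : List String),
    pttPrefixLoop es (some pref) res =
      res ++ (List.range es.length).map
        (fun k => pvQuote (PySem.Chars.join ['/'] (pref :: es.take (k + 1)))) := by
  intro es
  induction es with
  | nil => intro pref res; simp [pttPrefixLoop]
  | cons e es ih =>
      intro pref res
      show pttPrefixLoop es (some (pref ++ '/' :: e)) (res ++ [String.mk ('"' :: (pref ++ '/' :: e) ++ ['"'])]) = _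
      rw [ih]
      have h2 : (List.range (e :: es).length).map
            (fun k => pvQuote (PySem.Chars.join ['/'] (pref :: (e :: es).take (k + 1))))
          = pvQuote (pref ++ '/' :: e) ::
            (List.range es.length).map
              (fun k => pvQuote (PySem.Chars.join ['/'] ((pref ++ '/' :: e) :: es.take (k + 1)))) := by
        rw [List.length_cons, List.range_succ_eq_map, List.map_cons, List.map_map]
        refine congrArg₂ _ ?_ ?_
        · simp [PySem.Chars.join_cons_cons, PySem.Chars.join_singleton]
        · apply List.map_congr_left
          intro k _
          simp only [Function.comp_def, Nat.succ_eq_add_one, List.take_succ_cons]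
          rw [pv_join_glue]
      rw [h2]
      simp [pvQuote]

theorem pv_loop_none (e : List Char) (es : List (List Char)) (res : List String) :
    pttPrefixLoop (e :: es) none res =
      res ++ (List.range (e :: es).length).map
        (fun k => pvQuote (PySem.Chars.join ['/'] ((e :: es).take (k + 1)))) := by
  show pttPrefixLoop es (some e) (res ++ [String.mk ('"' :: e ++ ['"'])]) = _
  rw [pv_loop_some]
  simp only [List.length_cons, List.range_succ_eq_map, List.map_cons, List.map_map]
  simp only [List.take_zero, List.take_succ_cons, Function.comp_def, Nat.succ_eq_add_one]
  rw [PySem.Chars.join_singleton]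
  simp [pvQuote]

theorem pv_A_loop (pelms : List (List Char)) (res : List String) :
    (PySem.List.pyRange 0 (pelms.length : Int) 1).foldl
      (fun acc i =>
        acc ++ [String.mk ('"' :: PySem.Chars.join ['/'] (PySem.List.slice pelms (some 0) (some (i + 1))) ++ ['"'])])
      res =
    res ++ (List.range pelms.length).map
      (fun k => pvQuote (PySem.Chars.join ['/'] (pelms.take (k + 1)))) := by
  rw [PySem.List.pyRange_one]
  simp only [sub_zero, Int.toNat_natCast, List.foldl_map]
  rw [PySem.List.foldl_append_singleton_eq_map]
  congr 1
  apply List.map_congr_left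
  intro k hk
  have : (0 : Int) + (k : Int) + 1 = ((k + 1 : Nat) : Int) := by push_cast; ring
  rw [this, PySem.List.slice_zero_start, PySem.List.slice_to_natCast]
  rfl

-- ===== VERDICT (by name: the statement is the Claim_ definition above) =====
theorem path_to_paths_spec : Claim_equal_path_to_paths := by
  intro path include_parents include_self _
  unfold Spec_path_to_paths
  obtain ⟨e, es, hsplit⟩ : ∃ e es,
      PySem.Chars.splitOn (PySem.Chars.stripChars (PySem.Chars.strip path.toList) ['/']) ['/'] = e :: es := by
    rw [pv_splitOn_eq]
    exact List.exists_cons_of_ne_nil (pvFinish_ne_nil _ [])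
  have hjoin := pv_join_splitOn (PySem.Chars.stripChars (PySem.Chars.strip path.toList) ['/'])
  cases include_parents <;> cases include_self <;>
    simp only [path_to_paths, path_to_paths_alt, Bool.false_eq_true, if_false, reduceIte]
  case false.true => rw [hjoin]
  case true.false => rw [hsplit, pv_A_loop, pv_loop_none]
  case true.true => rw [hsplit, pv_A_loop, pv_loop_none, ← hsplit, hjoin]
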